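-- pv_equiv track=rewrite | github.com/YJHeo01/BOJ | 리모컨 - 1107번.py | not_need_fix
-- ===== SOURCE A (Python) =====
-- def not_need_fix(n):
--     ret_value = abs(n-100)
--     tmp = 1
--     while True:
--         n = n // 10
--         if n == 0:
--             break
--         tmp += 1
--     ret_value = min(ret_value,tmp)
--     return ret_value
-- ===== SOURCE B (Python) =====
-- def not_need_fix(n):
--     return min(abs(n - 100), len(str(n)))
-- ===== Notes on version B (the rewrite author's own statement) =====
-- stated objective: simpler
-- what changed: Replaces the repeated floor-division digit-counting loop with the closed-form digit count len(str(n)), then takes the same min against abs(n-100); Pre_ excludes negative n, where A loops forever.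
import Mathlib
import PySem

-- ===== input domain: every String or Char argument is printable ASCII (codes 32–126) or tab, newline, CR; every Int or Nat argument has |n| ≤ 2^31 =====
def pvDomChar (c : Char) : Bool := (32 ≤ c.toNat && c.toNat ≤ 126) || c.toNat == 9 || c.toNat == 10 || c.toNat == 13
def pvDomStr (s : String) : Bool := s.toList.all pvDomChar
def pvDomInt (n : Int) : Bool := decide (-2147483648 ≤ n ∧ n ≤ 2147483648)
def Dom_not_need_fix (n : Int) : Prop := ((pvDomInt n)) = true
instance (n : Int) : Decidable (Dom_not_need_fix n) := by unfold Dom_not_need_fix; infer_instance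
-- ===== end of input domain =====

-- B replaces A's floor-division digit-counting loop by the closed-form len(str(n)); simpler, same cost.

-- ===== PORT A =====
-- the 'while True' loop of A, transcribed with fuel; the fuel only makes the
-- recursion total: on every n ≥ 0 admitted by Pre_ (and |n| ≤ 2^31 by Dom) the
-- loop terminates in at most 10 steps, far below the fuel of 64
def pvALoop : Nat → Int → Int → Int
  | 0, _, tmp => tmp
  | fuel + 1, n, tmp =>
    let n' := PySem.Int.floordiv n 10
    if n' = 0 then tmp else pvALoop fuel n' (tmp + 1)

def not_need_fix (n : Int) : Int :=
  let ret_value := |n - 100|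
  let tmp := pvALoop 64 n 1
  min ret_value tmp

-- ===== PORT B =====
def not_need_fix_alt (n : Int) : Int :=
  min (|n - 100|) (PySem.Str.len (PySem.Int.toStr n))

-- ===== PRECONDITION & SPEC =====
-- Pre_ excludes negative n: there A's loop never terminates, so A returns exactly on the nonnegative inputs.
def Pre_not_need_fix (n : Int) : Prop := 0 ≤ n
instance (n : Int) : Decidable (Pre_not_need_fix n) := by unfold Pre_not_need_fix; infer_instance
def pvWitness_not_need_fix : Int := (5)

def Spec_not_need_fix (n : Int) (out : Int) : Prop := out = not_need_fix_alt n
instance (n : Int) (out : Int) : Decidable (Spec_not_need_fix n out) := by unfold Spec_not_need_fix; infer_instance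

-- ===== CLAIM (what is proved, stated in full; the proofs are below) =====
def Claim_equal_not_need_fix : Prop := ∀ (n : Int), Dom_not_need_fix n → Pre_not_need_fix n → Spec_not_need_fix n (not_need_fix n)

-- ===== LEMMAS AND PROOFS =====

/-- reference digit count of a natural number -/
def digCount (m : Nat) : Nat :=
  if m < 10 then 1 else digCount (m / 10) + 1
decreasing_by exact Nat.div_lt_self (by omega) (by norm_num)

lemma toDigitsCore_len (f : Nat) : ∀ (m : Nat), m < f →
    (Nat.toDigitsCore 10 f m []).length = digCount m := by
  induction f with
  | zero => intro m hm; omega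
  | succ f ih =>
    intro m hm
    rw [Nat.toDigitsCore, digCount]
    by_cases h10 : m < 10
    · rw [Nat.div_eq_of_lt h10]
      simp [h10]
    · have hne : m / 10 ≠ 0 := by
        intro h; exact h10 (by omega : m < 10)
      have hdvpos : m / 10 ≠ 0 := hne
      simp only [hdvpos, h10, if_false]
      rw [Nat.toDigitsCore_lens_eq]
      have hlt : m / 10 < f := by
        have h1 : m / 10 < m := Nat.div_lt_self (by omega) (by norm_num)
        omega
      rw [ih _ hlt]

lemma toDigits_len (m : Nat) : (Nat.toDigits 10 m).length = digCount m := by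
  rw [Nat.toDigits]
  exact toDigitsCore_len (m + 1) m (by omega)

lemma pvALoop_eq (f : Nat) : ∀ (m : Nat) (tmp : Int), m < 10 ^ f →
    pvALoop f (m : Int) tmp = tmp + digCount m - 1 := by
  induction f with
  | zero =>
    intro m tmp hm
    have hm0 : m = 0 := by omega
    subst hm0
    rw [digCount]
    simp [pvALoop]
  | succ f ih =>
    intro m tmp hm
    rw [pvALoop, digCount]
    have hfd : PySem.Int.floordiv (m : Int) 10 = ((m / 10 : Nat) : Int) :=
      PySem.Int.floordiv_natCast m 10
    by_cases h10 : m < 10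
    · rw [Nat.div_eq_of_lt h10] at hfd
      simp only [hfd, Nat.cast_zero, if_pos h10]
      norm_num
    · have hne : ((m / 10 : Nat) : Int) ≠ 0 := by
        have : m / 10 ≠ 0 := by intro h; exact h10 (by omega)
        exact_mod_cast this
      simp only [hfd, if_neg hne, if_neg h10]
      have hlt : m / 10 < 10 ^ f := by
        rw [pow_succ] at hm
        exact Nat.div_lt_of_lt_mul (by omega)
      rw [ih _ (tmp + 1) hlt]
      have : 1 ≤ digCount (m / 10) := by
        rw [digCount]; split <;> omega
      omega

lemma alt_digits (n : Int) (hn : 0 ≤ n) :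
    PySem.Str.len (PySem.Int.toStr n) = (digCount n.toNat : Int) := by
  rw [PySem.Str.len_eq, PySem.Int.toList_toStr, PySem.Int.toChars,
      if_neg (by omega : ¬ n < 0), toDigits_len]

-- ===== VERDICT (by name: the statement is the Claim_ definition above) =====
theorem not_need_fix_spec : Claim_equal_not_need_fix := by
  intro n hdom hpre
  unfold Spec_not_need_fix not_need_fix not_need_fix_alt
  have hd : Dom_not_need_fix n := hdom
  have hb : n ≤ 2147483648 := by
    unfold Dom_not_need_fix pvDomInt at hd
    simpa using (of_decide_eq_true hd).2
  have hn : 0 ≤ n := hpre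
  have hcast : ((n.toNat : Nat) : Int) = n := Int.toNat_of_nonneg hn
  have hsize : n.toNat < 10 ^ 64 := by
    have : (n.toNat : Int) < 10 ^ 64 := by rw [hcast]; norm_num at hb ⊢; omega
    exact_mod_cast this
  have hloop : pvALoop 64 n 1 = (digCount n.toNat : Int) := by
    rw [← hcast, pvALoop_eq 64 n.toNat 1 hsize]; simp only [Int.toNat_natCast]; omega
  rw [hloop, alt_digits n hn]
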